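-- pv_equiv track=rewrite | github.com/sdobbs/calibration_train | HDJobUtils.py | GetRunPeriodFromRun
-- ===== SOURCE A (Python) =====
-- def GetRunPeriodFromRun(run):
--     # mapping between run range names and (low run, high run) pairs
--     RunPeriod_Run_Map = {
--         "RunPeriod-2014-10" : (  630, 2439 ),
--         "RunPeriod-2015-01" : ( 2440, 2606 ),
--         "RunPeriod-2015-03" : ( 2607, 3385 ),
--         "RunPeriod-2015-06" : ( 3386, 3938 ),
--         "RunPeriod-2015-12" : ( 3939, 9999 ),
--         "RunPeriod-2016-02" : ( 10000, 19999 ),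
--         "RunPeriod-2016-10" : ( 20000, 9999999 )
--         }
--
--     # perform a linear search through the mapping
--     the_run_period = None
--     for (run_period, run_range) in RunPeriod_Run_Map.items():
--         if( (int(run)>=run_range[0]) and (int(run)<=run_range[1]) ):
--             the_run_period = run_period
--             break
--     if the_run_period is None:
--         the_run_period = ""
--     return the_run_period
-- ===== SOURCE B (Python) =====
-- import bisect
--
-- _BOUNDS = [630, 2440, 2607, 3386, 3939, 10000, 20000]
-- _NAMES = ["RunPeriod-2014-10", "RunPeriod-2015-01", "RunPeriod-2015-03",
--           "RunPeriod-2015-06", "RunPeriod-2015-12", "RunPeriod-2016-02",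
--           "RunPeriod-2016-10"]
--
-- def GetRunPeriodFromRun(run):
--     r = int(run)
--     if r < 630 or r > 9999999:
--         return ""
--     return _NAMES[bisect.bisect_right(_BOUNDS, r) - 1]
-- ===== Notes on version B (the rewrite author's own statement) =====
-- stated objective: idiomatic
-- what changed: Replaces the linear scan over a dict of (low,high) interval pairs by a binary search (bisect_right) over a precomputed sorted list of lower bounds with parallel names, exploiting that the intervals are contiguous and monotone.
import Mathlib
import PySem

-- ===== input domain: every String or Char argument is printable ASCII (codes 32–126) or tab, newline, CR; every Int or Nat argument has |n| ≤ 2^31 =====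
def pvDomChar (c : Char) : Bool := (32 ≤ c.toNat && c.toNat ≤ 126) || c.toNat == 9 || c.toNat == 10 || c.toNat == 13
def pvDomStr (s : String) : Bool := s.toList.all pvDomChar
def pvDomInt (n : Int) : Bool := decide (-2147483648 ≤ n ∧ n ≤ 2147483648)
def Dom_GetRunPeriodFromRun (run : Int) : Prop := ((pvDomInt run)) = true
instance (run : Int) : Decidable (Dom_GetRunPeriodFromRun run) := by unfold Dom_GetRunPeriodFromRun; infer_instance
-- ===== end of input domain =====

-- ===== PORT A =====
-- A: linear scan through the ordered map of (run period, (low, high)) pairs,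
-- returning the first matching period, else "".
def pvRunPeriodRunMap : List (String × Int × Int) :=
  [ ("RunPeriod-2014-10", 630, 2439),
    ("RunPeriod-2015-01", 2440, 2606),
    ("RunPeriod-2015-03", 2607, 3385),
    ("RunPeriod-2015-06", 3386, 3938),
    ("RunPeriod-2015-12", 3939, 9999),
    ("RunPeriod-2016-02", 10000, 19999),
    ("RunPeriod-2016-10", 20000, 9999999) ]

def pvScanMap : List (String × Int × Int) → Int → Option String
  | [], _ => none
  | (name, lo, hi) :: rest, r =>
      if lo ≤ r ∧ r ≤ hi then some name else pvScanMap rest r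

def GetRunPeriodFromRun (run : Int) : String :=
  (pvScanMap pvRunPeriodRunMap run).getD ""

-- ===== PORT B =====
-- B: guard the tails, then binary search (bisect_right) the sorted lower bounds.
def pvBounds : List Int := [630, 2440, 2607, 3386, 3939, 10000, 20000]
def pvNames : List String :=
  ["RunPeriod-2014-10", "RunPeriod-2015-01", "RunPeriod-2015-03",
   "RunPeriod-2015-06", "RunPeriod-2015-12", "RunPeriod-2016-02",
   "RunPeriod-2016-10"]

-- transliteration of bisect.bisect_right's while loop; the fuel argument only
-- makes the recursion structural (hi - lo shrinks each step, so fuel = hi suffices)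
def pvBisectRight (a : List Int) (x : Int) : Nat → Nat → Nat → Nat
  | 0, lo, _ => lo
  | fuel + 1, lo, hi =>
      if lo < hi then
        let mid := (lo + hi) / 2
        if x < a.getD mid 0 then pvBisectRight a x fuel lo mid
        else pvBisectRight a x fuel (mid + 1) hi
      else lo

def GetRunPeriodFromRun_alt (run : Int) : String :=
  if run < 630 ∨ run > 9999999 then ""
  else pvNames.getD (pvBisectRight pvBounds run pvBounds.length 0 pvBounds.length - 1) ""

-- ===== PRECONDITION & SPEC =====
def Spec_GetRunPeriodFromRun (run : Int) (out : String) : Prop := out = GetRunPeriodFromRun_alt run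
instance (run : Int) (out : String) : Decidable (Spec_GetRunPeriodFromRun run out) := by unfold Spec_GetRunPeriodFromRun; infer_instance

-- ===== CLAIM (what is proved, stated in full; the proofs are below) =====
def Claim_equal_GetRunPeriodFromRun : Prop := ∀ (run : Int), Dom_GetRunPeriodFromRun run → Spec_GetRunPeriodFromRun run (GetRunPeriodFromRun run)

-- ===== LEMMAS AND PROOFS =====
theorem pv_eq (run : Int) : GetRunPeriodFromRun run = GetRunPeriodFromRun_alt run := by
  unfold GetRunPeriodFromRun GetRunPeriodFromRun_alt
  by_cases h1 : run < 630
  · simp [pvRunPeriodRunMap, pvScanMap,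
      show run < 630 ∨ run > 9999999 from Or.inl h1,
      show ¬ (630:Int) ≤ run from by omega, show ¬ (2440:Int) ≤ run from by omega,
      show ¬ (2607:Int) ≤ run from by omega, show ¬ (3386:Int) ≤ run from by omega,
      show ¬ (3939:Int) ≤ run from by omega, show ¬ (10000:Int) ≤ run from by omega,
      show ¬ (20000:Int) ≤ run from by omega]
  · by_cases h2 : run ≤ 2439
    · simp [pvRunPeriodRunMap, pvScanMap, pvBisectRight, pvBounds, pvNames,
        h1, show ¬ run > 9999999 from by omega,
        show (630:Int) ≤ run from by omega, h2,
        show run < 3386 from by omega, show run < 2440 from by omega]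
    · by_cases h3 : run ≤ 2606
      · simp [pvRunPeriodRunMap, pvScanMap, pvBisectRight, pvBounds, pvNames,
          h1, show ¬ run > 9999999 from by omega,
          h2, show (2440:Int) ≤ run from by omega, h3,
          show run < 3386 from by omega, show ¬ run < 2440 from by omega,
          show run < 2607 from by omega]
      · by_cases h4 : run ≤ 3385
        · simp [pvRunPeriodRunMap, pvScanMap, pvBisectRight, pvBounds, pvNames,
            h1, show ¬ run > 9999999 from by omega,
            h2, h3, show (2607:Int) ≤ run from by omega, h4,
            show run < 3386 from by omega, show ¬ run < 2440 from by omega,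
            show ¬ run < 2607 from by omega]
        · by_cases h5 : run ≤ 3938
          · simp [pvRunPeriodRunMap, pvScanMap, pvBisectRight, pvBounds, pvNames,
              h1, show ¬ run > 9999999 from by omega,
              h2, h3, h4, show (3386:Int) ≤ run from by omega, h5,
              show ¬ run < 3386 from by omega, show run < 10000 from by omega,
              show run < 3939 from by omega]
          · by_cases h6 : run ≤ 9999
            · simp [pvRunPeriodRunMap, pvScanMap, pvBisectRight, pvBounds, pvNames,
                h1, show ¬ run > 9999999 from by omega,
                h2, h3, h4, h5, show (3939:Int) ≤ run from by omega, h6,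
                show ¬ run < 3386 from by omega, show run < 10000 from by omega,
                show ¬ run < 3939 from by omega]
            · by_cases h7 : run ≤ 19999
              · simp [pvRunPeriodRunMap, pvScanMap, pvBisectRight, pvBounds, pvNames,
                  h1, show ¬ run > 9999999 from by omega,
                  h2, h3, h4, h5, h6, show (10000:Int) ≤ run from by omega, h7,
                  show ¬ run < 3386 from by omega, show ¬ run < 10000 from by omega,
                  show run < 20000 from by omega]
              · by_cases h8 : run ≤ 9999999
                · simp [pvRunPeriodRunMap, pvScanMap, pvBisectRight, pvBounds, pvNames,
                    h1, show ¬ run > 9999999 from by omega,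
                    h2, h3, h4, h5, h6, h7, show (20000:Int) ≤ run from by omega, h8,
                    show ¬ run < 3386 from by omega, show ¬ run < 10000 from by omega,
                    show ¬ run < 20000 from by omega]
                · simp [pvRunPeriodRunMap, pvScanMap,
                    show run < 630 ∨ run > 9999999 from Or.inr (by omega),
                    h2, h3, h4, h5, h6, h7, h8]

-- ===== VERDICT (by name: the statement is the Claim_ definition above) =====
theorem GetRunPeriodFromRun_spec : Claim_equal_GetRunPeriodFromRun := by
  intro run _
  unfold Spec_GetRunPeriodFromRun
  exact pv_eq run
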